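-- pv_equiv track=rewrite | github.com/Abdulsemed/competitive-programing | 1171-remove-zero-sum-consecutive-nodes-from-linked-list/1171-remove-zero-sum-consecutive-nodes-from-linked-list.py | cutter
-- ===== SOURCE A (Python) =====
-- def cutter(idx,arr):
--     currSum = 0
--     pos  = -1
--     for index in range(idx,len(arr)):
--         currSum += arr[index]
--         if currSum == 0:
--             pos = index
--
--     return pos
-- ===== SOURCE B (Python) =====
-- def cutter(idx, arr):
--     sums = []
--     s = 0
--     for x in arr[idx:]:
--         s += x
--         sums.append(s)
--     for j, v in reversed(list(enumerate(sums))):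
--         if v == 0:
--             return idx + j
--     return -1
-- ===== Notes on version B (the rewrite author's own statement) =====
-- stated objective: alternative
-- what changed: A keeps a running sum and overwrites the answer on every zero in a single forward pass; B first builds the prefix-sum table of arr[idx:] and then scans it backward, returning at the first (i.e. last) zero it meets.
-- outside the precondition, e.g. on cutter(-1, [1, -1]): A returns 0, B returns -1
import Mathlib
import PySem

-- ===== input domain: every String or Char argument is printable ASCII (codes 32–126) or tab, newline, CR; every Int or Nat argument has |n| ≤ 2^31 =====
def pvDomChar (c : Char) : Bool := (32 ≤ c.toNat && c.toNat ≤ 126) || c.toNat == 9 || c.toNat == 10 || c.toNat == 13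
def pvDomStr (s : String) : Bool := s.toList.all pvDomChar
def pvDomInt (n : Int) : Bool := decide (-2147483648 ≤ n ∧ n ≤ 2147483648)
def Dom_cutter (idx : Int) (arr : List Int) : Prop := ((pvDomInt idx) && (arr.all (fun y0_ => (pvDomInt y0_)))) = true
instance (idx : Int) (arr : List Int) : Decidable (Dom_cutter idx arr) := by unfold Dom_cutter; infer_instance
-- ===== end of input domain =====

-- B builds the prefix-sum table of arr[idx:] and scans it backward with early return,
-- instead of A's forward running-sum loop that overwrites the answer at every zero (objective: alternative).


-- ===== PORT A =====
def cutter (idx : Int) (arr : List Int) : Int :=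
  ((PySem.List.pyRange idx (arr.length : Int) 1).foldl
    (fun (st : Int × Int) index =>
      let currSum := st.1 + PySem.List.pyGetD arr index 0
      (currSum, if currSum = 0 then index else st.2))
    (0, -1)).2

-- ===== PORT B =====
def cutter_alt (idx : Int) (arr : List Int) : Int :=
  let tail := PySem.List.slice arr (some idx) none
  let sums := (tail.foldl (fun (p : Int × List Int) x => (p.1 + x, p.2 ++ [p.1 + x])) (0, ([] : List Int))).2
  match (PySem.List.enumerate sums 0).reverse.find? (fun p => p.2 == 0) with
  | some p => idx + p.1
  | none => -1

-- ===== PRECONDITION & SPEC =====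
-- Pre_ excludes negative idx: for -len(arr) ≤ idx < 0 A's value comes from Python's
-- negative-index wraparound (the loop sums arr[idx:] and then continues over the whole list),
-- an accidental corner B's slice-based reading does not share; for idx < -len(arr) A raises IndexError.
def Pre_cutter (idx : Int) (arr : List Int) : Prop := 0 ≤ idx
instance (idx : Int) (arr : List Int) : Decidable (Pre_cutter idx arr) := by unfold Pre_cutter; infer_instance
def pvWitness_cutter : Int × List Int := (1, [2, -2, 3])

def Spec_cutter (idx : Int) (arr : List Int) (out : Int) : Prop := out = cutter_alt idx arr
instance (idx : Int) (arr : List Int) (out : Int) : Decidable (Spec_cutter idx arr out) := by unfold Spec_cutter; infer_instance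

-- ===== CLAIM (what is proved, stated in full; the proofs are below) =====
def Claim_equal_cutter : Prop := ∀ (idx : Int) (arr : List Int), Dom_cutter idx arr → Pre_cutter idx arr → Spec_cutter idx arr (cutter idx arr)

-- ===== LEMMAS AND PROOFS =====

/-- A's loop, restated over the tail list with an explicit running index. -/
def foldA : List Int → Int → Int → Int → Int × Int
  | [], _, s, p => (s, p)
  | x :: t, j, s, p => foldA t (j + 1) (s + x) (if s + x = 0 then j else p)

/-- Offset (from the front) of the last zero of the prefix sums of `t` started at `s`. -/
def lastZero : Int → List Int → Option Int
  | _, [] => none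
  | s, x :: t =>
    match lastZero (s + x) t with
    | some m => some (m + 1)
    | none => if s + x = 0 then some 0 else none

/-- Prefix sums of `t` starting from accumulator `s`. -/
def prefixSums : Int → List Int → List Int
  | _, [] => []
  | s, x :: t => (s + x) :: prefixSums (s + x) t

lemma bridgeA (arr : List Int) (k : Nat) (s p : Int) :
    (PySem.List.pyRange (k : Int) (arr.length : Int) 1).foldl
      (fun (st : Int × Int) index =>
        let currSum := st.1 + PySem.List.pyGetD arr index 0
        (currSum, if currSum = 0 then index else st.2)) (s, p)
    = foldA (arr.drop k) (k : Int) s p := by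
  rcases Nat.lt_or_ge k arr.length with h | h
  · rw [PySem.List.pyRange_one_cons (by exact_mod_cast h)]
    rw [List.drop_eq_getElem_cons h]
    simp only [List.foldl_cons, foldA, PySem.List.pyGetD_natCast]
    have hget : arr.getD k 0 = arr[k] := List.getD_eq_getElem arr 0 h
    rw [hget]
    have hcast : ((k : Int) + 1) = ((k + 1 : Nat) : Int) := by push_cast; ring
    rw [hcast]
    exact bridgeA arr (k + 1) (s + arr[k]) (if s + arr[k] = 0 then (k : Int) else p)
  · rw [PySem.List.pyRange_one_eq_nil (by exact_mod_cast h), List.drop_eq_nil_of_le h]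
    rfl
termination_by arr.length - k

lemma lastZ (t : List Int) (j s p : Int) :
    (foldA t j s p).2 = match lastZero s t with
      | some m => j + m
      | none => p := by
  induction t generalizing j s p with
  | nil => rfl
  | cons x t ih =>
    simp only [foldA, lastZero, ih]
    cases h : lastZero (s + x) t with
    | some m => simp; ring
    | none => by_cases hz : s + x = 0 <;> simp [hz]

lemma sums_eq (t : List Int) (s : Int) (acc : List Int) :
    (t.foldl (fun (p : Int × List Int) x => (p.1 + x, p.2 ++ [p.1 + x])) (s, acc)).2
    = acc ++ prefixSums s t := by
  induction t generalizing s acc with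
  | nil => simp [prefixSums]
  | cons x t ih => simp [prefixSums, ih]

lemma findRev (t : List Int) (s j : Int) :
    (PySem.List.enumerate (prefixSums s t) j).reverse.find? (fun p => p.2 == 0)
    = (lastZero s t).map (fun m => (j + m, (0 : Int))) := by
  induction t generalizing s j with
  | nil => simp [prefixSums, lastZero, PySem.List.enumerate_nil]
  | cons x t ih =>
    simp only [prefixSums, lastZero, PySem.List.enumerate_cons, List.reverse_cons,
      List.find?_append, ih]
    cases h : lastZero (s + x) t with
    | some m =>
      have : j + 1 + m = j + (m + 1) := by ring
      simp [this]
    | none =>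
      by_cases hz : s + x = 0 <;> simp [hz]

lemma cutter_alt_char (idx : Int) (arr : List Int) (h : 0 ≤ idx) :
    cutter_alt idx arr = match lastZero 0 (arr.drop idx.toNat) with
      | some m => idx + m
      | none => -1 := by
  unfold cutter_alt
  simp only [PySem.List.slice_from arr h]
  simp only [sums_eq, List.nil_append, findRev]
  cases lastZero 0 (arr.drop idx.toNat) with
  | some m => simp
  | none => simp

-- ===== VERDICT (by name: the statement is the Claim_ definition above) =====
theorem cutter_spec : Claim_equal_cutter := by
  intro idx arr _ hpre
  unfold Spec_cutter
  have hpre' : (0 : Int) ≤ idx := hpre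
  rcases Int.lt_or_le idx (arr.length : Int) with h | h
  · have hk : idx = ((idx.toNat : Nat) : Int) := by omega
    unfold cutter
    rw [hk, bridgeA arr idx.toNat 0 (-1), lastZ, cutter_alt_char _ _ (by omega)]
    rw [← hk]
  · have hnil : PySem.List.pyRange idx (arr.length : Int) 1 = [] :=
      PySem.List.pyRange_one_eq_nil h
    have hdrop : arr.drop idx.toNat = [] := List.drop_eq_nil_of_le (by omega)
    rw [cutter_alt_char _ _ hpre']
    unfold cutter
    rw [hnil, hdrop]
    rfl
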